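-- pv_equiv track=rewrite | github.com/odormond/adventofcode | 2022/16/sixteen.py | part2
-- ===== SOURCE A (Python) =====
-- def part2(nodes, moves):
--     finals = set()
--     DEADLINE = 26
--     queue = {(0, 'AA', 0, 'AA', ())}
--     while queue:
--         next_queue = set()
--         for current_t, node1, next_t, node2, opened in queue:
--             done = dict(opened)
--             progress = False
--             for cost, start, end in moves:
--                 if start != node1 or end in done or current_t + cost >= DEADLINE:
--                     continue
--                 next_opened = tuple(sorted(opened + ((end, DEADLINE - current_t - cost),)))
--                 if next_t < current_t + cost:
--                     # Node 2 act next
--                     next_state = (next_t, node2, current_t + cost, end, next_opened)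
--                 else:
--                     # Node 1 has time to make a second move before node2 is done
--                     next_state = (current_t + cost, end, next_t, node2, next_opened)
--                 next_queue.add(next_state)
--                 progress = True
--             if not progress:
--                 finals.add(opened)
--         queue = next_queue
--     return max(
--         sum(nodes[node] * opened_for for node, opened_for in opened) for opened in finals
--     )
-- ===== SOURCE B (Python) =====
-- def part2(nodes, moves):
--     DEADLINE = 26
--
--     def best(current_t, node1, next_t, node2, opened):
--         done = {v for v, _ in opened}
--         result = None
--         for cost, start, end in moves:
--             if start != node1 or end in done or current_t + cost >= DEADLINE:
--                 continue
--             new_opened = opened + ((end, DEADLINE - current_t - cost),)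
--             if next_t < current_t + cost:
--                 sub = best(next_t, node2, current_t + cost, end, new_opened)
--             else:
--                 sub = best(current_t + cost, end, next_t, node2, new_opened)
--             if result is None or sub > result:
--                 result = sub
--         if result is not None:
--             return result
--         return sum(nodes[v] * t for v, t in opened)
--
--     return best(0, 'AA', 0, 'AA', ())
-- ===== Notes on version B (the rewrite author's own statement) =====
-- stated objective: simpler
-- what changed: A runs a level-by-level breadth-first search over deduplicated joint states (sets of states, a collected set of final opened-tuples sorted into canonical order, then a max pass over the finals); B is a direct recursive depth-first search that returns the best achievable score of each state on the fly, with no frontier sets, no finals collection, no sorting and no final max pass.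
-- outside the precondition, e.g. on part2({'AA': 5}, [(30, 'AA', 'XX')]): A returns 0, B returns 0
import Mathlib
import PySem

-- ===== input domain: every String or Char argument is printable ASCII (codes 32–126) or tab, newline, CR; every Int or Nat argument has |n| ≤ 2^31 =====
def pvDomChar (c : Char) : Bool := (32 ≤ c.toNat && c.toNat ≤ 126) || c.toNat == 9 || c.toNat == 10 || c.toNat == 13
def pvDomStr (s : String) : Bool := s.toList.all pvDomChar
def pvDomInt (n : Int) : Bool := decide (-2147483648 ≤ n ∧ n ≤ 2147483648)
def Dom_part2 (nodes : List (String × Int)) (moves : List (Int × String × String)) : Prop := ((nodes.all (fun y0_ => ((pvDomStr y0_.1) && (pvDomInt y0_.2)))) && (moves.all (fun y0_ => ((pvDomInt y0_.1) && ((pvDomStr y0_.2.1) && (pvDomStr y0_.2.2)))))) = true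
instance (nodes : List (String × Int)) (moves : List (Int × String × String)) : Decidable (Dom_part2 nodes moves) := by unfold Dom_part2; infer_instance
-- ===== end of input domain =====

-- B replaces A's joint breadth-first frontier of deduplicated states (sets of states, a collected
-- set of final opened-tuples, then a final max pass) by a direct recursive depth-first search that
-- returns the best achievable score of each state on the fly; objective: simpler (no frontier sets,
-- no finals collection, no sorting of the opened tuple, no final max pass).

-- ===== PORT A =====
-- a joint state (current_t, node1, next_t, node2, opened), as in A
abbrev PvSt : Type := Int × String × Int × String × List (String × Int)

-- nodes[v]: first-match lookup in the association list (0 is only a totality guard: Pre_part2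
-- excludes the inputs where Python raises KeyError)
def pvValve (nodes : List (String × Int)) (v : String) : Int :=
  ((nodes.find? (fun p => p.1 == v)).map Prod.snd).getD 0

-- sum(nodes[node] * opened_for for node, opened_for in opened)  (same expression in A and B)
def pvScore (nodes : List (String × Int)) (opened : List (String × Int)) : Int :=
  (opened.map (fun p => pvValve nodes p.1 * p.2)).sum

-- body of A's inner 'for cost, start, end in moves' loop (DEADLINE = 26)
def pvMoveStepA (ct : Int) (n1 : String) (nt : Int) (n2 : String)
    (opened : List (String × Int)) (done : PySem.Dict String Int)
    (acc : PySem.Set PvSt × Bool) (m : Int × String × String) : PySem.Set PvSt × Bool :=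
  if m.2.1 ≠ n1 ∨ done.contains m.2.2 = true ∨ 26 ≤ ct + m.1 then acc  -- continue
  else
    let nopened := PySem.List.sorted2 (opened ++ [(m.2.2, 26 - ct - m.1)]) Prod.fst Prod.snd
    let nst : PvSt := if nt < ct + m.1 then (nt, n2, ct + m.1, m.2.2, nopened)
                      else (ct + m.1, m.2.2, nt, n2, nopened)
    (acc.1.add nst, true)

-- body of A's 'for current_t, node1, next_t, node2, opened in queue' loop; acc = (next_queue, finals)
def pvStateStepA (moves : List (Int × String × String))
    (acc : PySem.Set PvSt × PySem.Set (List (String × Int))) (st : PvSt) :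
    PySem.Set PvSt × PySem.Set (List (String × Int)) :=
  match st with
  | (ct, n1, nt, n2, opened) =>
    let done := PySem.Dict.ofList opened
    let r := moves.foldl (pvMoveStepA ct n1 nt n2 opened done) (acc.1, false)
    if r.2 then (r.1, acc.2) else (r.1, acc.2.add opened)  -- if not progress: finals.add(opened)

-- A's 'while queue' loop; each transition opens one more valve, so moves.length + 1 levels
-- of fuel always suffice (proved below) — the fuel is only a totality guard
def pvLoopA (moves : List (Int × String × String)) :
    Nat → PySem.Set PvSt → PySem.Set (List (String × Int)) → PySem.Set (List (String × Int))
  | 0, _queue, finals => finals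
  | fuel+1, queue, finals =>
    if queue = [] then finals
    else
      let r := queue.foldl (pvStateStepA moves) (PySem.Set.empty, finals)
      pvLoopA moves fuel r.1 r.2

def part2 (nodes : List (String × Int)) (moves : List (Int × String × String)) : Int :=
  let finals := pvLoopA moves (moves.length + 1)
      (PySem.Set.ofList [((0 : Int), "AA", (0 : Int), "AA", ([] : List (String × Int)))])
      PySem.Set.empty
  match PySem.List.max? (finals.map (pvScore nodes)) (fun x => x) with
  | some m => m
  | none => 0  -- unreachable: finals is never empty

-- ===== PORT B =====
-- recursive best(current_t, node1, next_t, node2, opened) of Source B; the Nat fuel is only a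
-- totality guard (the recursion depth is at most moves.length, proved below)
def pvBestB (nodes : List (String × Int)) (moves : List (Int × String × String)) :
    Nat → Int → String → Int → String → List (String × Int) → Int
  | 0, _, _, _, _, opened => pvScore nodes opened  -- dead branch, never reached from part2_alt
  | fuel+1, ct, n1, nt, n2, opened =>
    let done := PySem.Set.ofList (opened.map Prod.fst)
    let result := moves.foldl (fun (result : Option Int) m =>
      if m.2.1 ≠ n1 ∨ PySem.Set.contains done m.2.2 = true ∨ 26 ≤ ct + m.1 then result
      else
        let sub := if nt < ct + m.1 then
            pvBestB nodes moves fuel nt n2 (ct + m.1) m.2.2 (opened ++ [(m.2.2, 26 - ct - m.1)])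
          else
            pvBestB nodes moves fuel (ct + m.1) m.2.2 nt n2 (opened ++ [(m.2.2, 26 - ct - m.1)])
        match result with
        | none => some sub
        | some r => some (if sub > r then sub else r)) none
    match result with
    | some r => r
    | none => pvScore nodes opened

def part2_alt (nodes : List (String × Int)) (moves : List (Int × String × String)) : Int :=
  pvBestB nodes moves (moves.length + 1) 0 "AA" 0 "AA" []

-- ===== PRECONDITION & SPEC =====
-- the valves the two agents can ever stand on: closure of {'AA'} under the moves' start->end edges
-- (iterated moves.length times, which reaches the fixed point); every valve A can open lies in it
def pvReachable (moves : List (Int × String × String)) : List String :=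
  (List.range (moves.length + 1)).foldl
    (fun acc _ => moves.foldl
      (fun acc m => if m.2.1 ∈ acc ∧ m.2.2 ∉ acc then acc ++ [m.2.2] else acc) acc)
    ["AA"]

-- Pre_part2 excludes inputs where some move whose start valve is reachable from 'AA' targets a
-- valve that is not a key of nodes: opening such a valve makes A raise KeyError at the final
-- scoring.  Reachability here ignores the 26-minute deadline, so Pre_ is slightly wider than
-- necessary: it also excludes inputs whose missing target valves are reachable only after the
-- deadline and hence never opened, on which A returns normally (see claim.json cites).
def Pre_part2 (nodes : List (String × Int)) (moves : List (Int × String × String)) : Prop :=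
  ∀ m ∈ moves, m.2.1 ∈ pvReachable moves → m.2.2 ∈ nodes.map Prod.fst
instance (nodes : List (String × Int)) (moves : List (Int × String × String)) : Decidable (Pre_part2 nodes moves) := by unfold Pre_part2; infer_instance

def pvWitness_part2 : (List (String × Int)) × (List (Int × String × String)) :=
  ([("AA", 3), ("BB", 5)], [(1, "AA", "BB"), (2, "BB", "AA")])

def Spec_part2 (nodes : List (String × Int)) (moves : List (Int × String × String)) (out : Int) : Prop := out = part2_alt nodes moves
instance (nodes : List (String × Int)) (moves : List (Int × String × String)) (out : Int) : Decidable (Spec_part2 nodes moves out) := by unfold Spec_part2; infer_instance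

-- ===== CLAIM (what is proved, stated in full; the proofs are below) =====
def Claim_equal_part2 : Prop := ∀ (nodes : List (String × Int)) (moves : List (Int × String × String)), Dom_part2 nodes moves → Pre_part2 nodes moves → Spec_part2 nodes moves (part2 nodes moves)

-- ===== LEMMAS AND PROOFS =====

-- ---- option-valued running maximum (the accumulator both searches effectively maintain) ----
def pvOmax2 (a : Option Int) (x : Int) : Option Int :=
  match a with
  | none => some x
  | some r => some (if x > r then x else r)

def pvMaxO (l : List Int) : Option Int := l.foldl pvOmax2 none

def pvOmax (a b : Option Int) : Option Int :=
  match a, b with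
  | none, b => b
  | a, none => a
  | some x, some y => some (max x y)

theorem pvIfMax (x r : Int) : (if x > r then x else r) = max r x := by
  rw [max_def]; split_ifs <;> omega

theorem pvFoldlOmax2_some (t : List Int) (c : Int) :
    t.foldl pvOmax2 (some c) = some (t.foldl max c) := by
  induction t generalizing c with
  | nil => rfl
  | cons x t ih => simp [List.foldl_cons, pvOmax2, pvIfMax, ih]

theorem pvMaxO_cons (x : Int) (t : List Int) : pvMaxO (x :: t) = some (t.foldl max x) := by
  simp [pvMaxO, List.foldl_cons, pvOmax2, pvFoldlOmax2_some]

theorem pvFoldlMaxComm (t : List Int) (x y : Int) :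
    t.foldl max (max x y) = max x (t.foldl max y) := by
  induction t generalizing y with
  | nil => rfl
  | cons z t ih => simp [List.foldl_cons, max_assoc, ih]

theorem pvMaxO_cons_omax (x : Int) (t : List Int) :
    pvMaxO (x :: t) = pvOmax (some x) (pvMaxO t) := by
  cases t with
  | nil => rfl
  | cons y t => simp [pvMaxO_cons, pvOmax, List.foldl_cons, pvFoldlMaxComm]

theorem pvOmax_none_right (a : Option Int) : pvOmax a none = a := by cases a <;> rfl

theorem pvOmax_assoc (a b c : Option Int) : pvOmax (pvOmax a b) c = pvOmax a (pvOmax b c) := by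
  cases a <;> cases b <;> cases c <;> simp [pvOmax, max_assoc]

theorem pvOmax_comm (a b : Option Int) : pvOmax a b = pvOmax b a := by
  cases a <;> cases b <;> simp [pvOmax, max_comm]

theorem pvOmax_left_comm (a b c : Option Int) :
    pvOmax a (pvOmax b c) = pvOmax b (pvOmax a c) := by
  rw [← pvOmax_assoc, pvOmax_comm a b, pvOmax_assoc]

theorem pvMaxO_append (l₁ l₂ : List Int) :
    pvMaxO (l₁ ++ l₂) = pvOmax (pvMaxO l₁) (pvMaxO l₂) := by
  induction l₁ with
  | nil => rfl
  | cons x t ih =>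
      rw [List.cons_append, pvMaxO_cons_omax, pvMaxO_cons_omax, ih, pvOmax_assoc]

theorem pvMaxO_spec (l : List Int) (m : Int) (h : pvMaxO l = some m) :
    m ∈ l ∧ ∀ x ∈ l, x ≤ m := by
  cases l with
  | nil => simp [pvMaxO] at h
  | cons x t =>
      rw [pvMaxO_cons] at h
      obtain rfl : t.foldl max x = m := by injection h
      refine ⟨?_, ?_⟩
      · rcases PySem.List.foldl_max_mem t x with h' | h'
        · rw [h']; exact List.mem_cons_self
        · exact List.mem_cons_of_mem _ h'
      · intro y hy
        rcases List.mem_cons.1 hy with rfl | hy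
        · exact (PySem.List.le_foldl_max t y).1
        · exact (PySem.List.le_foldl_max t x).2 y hy

theorem pvMaxO_none_iff (l : List Int) : pvMaxO l = none ↔ l = [] := by
  cases l with
  | nil => simp [pvMaxO]
  | cons x t => simp [pvMaxO_cons]

theorem pvMaxO_congr (l l' : List Int) (h : ∀ x, x ∈ l ↔ x ∈ l') : pvMaxO l = pvMaxO l' := by
  cases hl : pvMaxO l with
  | none =>
      rw [pvMaxO_none_iff] at hl; subst hl
      cases hl' : pvMaxO l' with
      | none => rfl
      | some m =>
          obtain ⟨hm, _⟩ := pvMaxO_spec l' m hl'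
          exact absurd ((h m).2 hm) (List.not_mem_nil)
  | some m =>
      obtain ⟨hm, hub⟩ := pvMaxO_spec l m hl
      cases hl' : pvMaxO l' with
      | none =>
          rw [pvMaxO_none_iff] at hl'; subst hl'
          exact absurd ((h m).1 hm) (List.not_mem_nil)
      | some m' =>
          obtain ⟨hm', hub'⟩ := pvMaxO_spec l' m' hl'
          have h1 : m ≤ m' := hub' m ((h m).1 hm)
          have h2 : m' ≤ m := hub m' ((h m').2 hm')
          exact congrArg some (le_antisymm h1 h2)

theorem pvMax?_eq_pvMaxO (l : List Int) : PySem.List.max? l (fun x => x) = pvMaxO l := by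
  cases l with
  | nil => rfl
  | cons x t => rw [PySem.List.max?_id_cons, pvMaxO_cons]

-- ---- membership bridges for the two ports' 'end in done' guards ----
theorem pvContains_ofList (l : List (String × Int)) (k : String) :
    ((PySem.Dict.ofList l).contains k = true) ↔ k ∈ l.map Prod.fst := by
  have h : PySem.Dict.ofList l
      = l.foldl (fun d x => d.insert ((fun p : String × Int => p.1) x)
          ((fun (_ : PySem.Dict String Int) (p : String × Int) => p.2) d x)) PySem.Dict.empty := rfl
  rw [PySem.Dict.contains_iff_mem_keys, h,
    PySem.Dict.keys_foldl_insert_key l (fun p : String × Int => p.1) _ PySem.Dict.empty,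
    PySem.Dict.keys_empty]
  rw [PySem.Set.mem_update]
  simp

theorem pvSetContains_ofList (xs : List String) (k : String) :
    (PySem.Set.contains (PySem.Set.ofList xs) k = true) ↔ k ∈ xs := by
  simp [PySem.Set.contains, PySem.Set.mem_ofList]

theorem pvScore_perm (nodes : List (String × Int)) (oa ob : List (String × Int))
    (h : oa.Perm ob) : pvScore nodes oa = pvScore nodes ob :=
  List.Perm.sum_eq (h.map _)

-- ---- the one-state successor list both searches expand ----
def pvSuccA (moves : List (Int × String × String)) (ct : Int) (n1 : String) (nt : Int)
    (n2 : String) (opened : List (String × Int)) : List PvSt :=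
  moves.filterMap (fun m =>
    if m.2.1 ≠ n1 ∨ m.2.2 ∈ opened.map Prod.fst ∨ 26 ≤ ct + m.1 then none
    else some (
      let nopened := PySem.List.sorted2 (opened ++ [(m.2.2, 26 - ct - m.1)]) Prod.fst Prod.snd
      if nt < ct + m.1 then (nt, n2, ct + m.1, m.2.2, nopened)
      else (ct + m.1, m.2.2, nt, n2, nopened)))

def pvSuccSt (moves : List (Int × String × String)) (st : PvSt) : List PvSt :=
  pvSuccA moves st.1 st.2.1 st.2.2.1 st.2.2.2.1 st.2.2.2.2

def pvStuckList (moves : List (Int × String × String)) (q : List PvSt) :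
    List (List (String × Int)) :=
  (q.filter (fun st => (pvSuccSt moves st).isEmpty)).map (fun st => st.2.2.2.2)

-- the value of a state: DFS best over its successors (the spec both ports compute)
def pvGA (nodes : List (String × Int)) (moves : List (Int × String × String)) :
    Nat → PvSt → Int
  | 0, st => pvScore nodes st.2.2.2.2
  | fuel+1, st =>
    match ((pvSuccSt moves st).map (pvGA nodes moves fuel)).foldl pvOmax2 none with
    | some r => r
    | none => pvScore nodes st.2.2.2.2

-- invariant of every reachable opened list: distinct valves, all of them targets of moves
def pvInvO (moves : List (Int × String × String)) (opened : List (String × Int)) : Prop :=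
  (opened.map Prod.fst).Nodup ∧ ∀ k ∈ opened.map Prod.fst, k ∈ moves.map (fun m => m.2.2)

theorem pvSucc_opened (moves : List (Int × String × String)) (ct : Int) (n1 : String) (nt : Int)
    (n2 : String) (opened : List (String × Int)) (t : PvSt)
    (ht : t ∈ pvSuccA moves ct n1 nt n2 opened) :
    ∃ e c, e ∈ moves.map (fun m => m.2.2) ∧ e ∉ opened.map Prod.fst ∧
      t.2.2.2.2.Perm (opened ++ [(e, c)]) := by
  obtain ⟨m, hm, hf⟩ := List.mem_filterMap.1 ht
  by_cases hg : (m.2.1 ≠ n1 ∨ m.2.2 ∈ opened.map Prod.fst ∨ 26 ≤ ct + m.1)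
  · rw [if_pos hg] at hf; cases hf
  · rw [if_neg hg] at hf
    push Not at hg
    refine ⟨m.2.2, 26 - ct - m.1, List.mem_map_of_mem hm, hg.2.1, ?_⟩
    obtain rfl := Option.some.inj hf
    by_cases h2 : nt < ct + m.1 <;>
      simpa [h2] using PySem.List.sorted2_perm (opened ++ [(m.2.2, 26 - ct - m.1)])
        Prod.fst Prod.snd false

theorem pvInvO_succ (moves : List (Int × String × String)) (ct : Int) (n1 : String) (nt : Int)
    (n2 : String) (opened : List (String × Int)) (t : PvSt)
    (hInv : pvInvO moves opened) (ht : t ∈ pvSuccA moves ct n1 nt n2 opened) :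
    pvInvO moves t.2.2.2.2 ∧ t.2.2.2.2.length = opened.length + 1 := by
  obtain ⟨e, c, he, hne, hperm⟩ := pvSucc_opened moves ct n1 nt n2 opened t ht
  have hmap : (t.2.2.2.2.map Prod.fst).Perm (opened.map Prod.fst ++ [e]) := by
    simpa using hperm.map Prod.fst
  refine ⟨⟨?_, ?_⟩, ?_⟩
  · refine hmap.nodup_iff.2 ?_
    rw [List.nodup_append]
    refine ⟨hInv.1, List.nodup_singleton _, ?_⟩
    intro a ha b hb
    rw [List.mem_singleton] at hb
    subst hb
    exact fun heq => hne (heq ▸ ha)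
  · intro k hk
    rcases (List.mem_append.1 (hmap.mem_iff.1 hk)) with hk' | hk'
    · exact hInv.2 k hk'
    · rw [List.mem_singleton] at hk'
      rw [hk']
      exact he
  · simpa using hperm.length_eq

theorem pvLen_le (moves : List (Int × String × String)) (opened : List (String × Int))
    (hInv : pvInvO moves opened) : opened.length ≤ moves.length := by
  have h1 : opened.length = (opened.map Prod.fst).length := by simp
  have h2 : (opened.map Prod.fst).toFinset.card = (opened.map Prod.fst).length :=
    List.toFinset_card_of_nodup hInv.1
  have h3 : (opened.map Prod.fst).toFinset ⊆ (moves.map (fun m => m.2.2)).toFinset := by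
    intro k hk
    exact List.mem_toFinset.2 (hInv.2 k (List.mem_toFinset.1 hk))
  have h4 : (moves.map (fun m => m.2.2)).toFinset.card ≤ moves.length := by
    calc (moves.map (fun m => m.2.2)).toFinset.card ≤ (moves.map (fun m => m.2.2)).length :=
          List.toFinset_card_le _
      _ = moves.length := by simp
  have := Finset.card_le_card h3
  omega

theorem pvSucc_nil_of_full (moves : List (Int × String × String)) (ct : Int) (n1 : String)
    (nt : Int) (n2 : String) (opened : List (String × Int)) (hInv : pvInvO moves opened)
    (hlen : moves.length ≤ opened.length) : pvSuccA moves ct n1 nt n2 opened = [] := by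
  have hsub : (moves.map (fun m => m.2.2)).toFinset ⊆ (opened.map Prod.fst).toFinset := by
    have h2 : (opened.map Prod.fst).toFinset.card = opened.length := by
      rw [List.toFinset_card_of_nodup hInv.1, List.length_map]
    have h3 : (opened.map Prod.fst).toFinset ⊆ (moves.map (fun m => m.2.2)).toFinset := by
      intro k hk
      exact List.mem_toFinset.2 (hInv.2 k (List.mem_toFinset.1 hk))
    have h4 : (moves.map (fun m => m.2.2)).toFinset.card ≤ moves.length := by
      calc (moves.map (fun m => m.2.2)).toFinset.card ≤ (moves.map (fun m => m.2.2)).length :=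
            List.toFinset_card_le _
        _ = moves.length := by simp
    have := Finset.eq_of_subset_of_card_le h3 (by omega)
    exact this.symm.subset
  rw [pvSuccA, List.filterMap_eq_nil_iff]
  intro m hm
  have hmem : m.2.2 ∈ opened.map Prod.fst := by
    have : m.2.2 ∈ (moves.map (fun m => m.2.2)).toFinset :=
      List.mem_toFinset.2 (List.mem_map_of_mem hm)
    exact List.mem_toFinset.1 (hsub this)
  rw [if_pos (Or.inr (Or.inl hmem))]

theorem pvGA_fuel (nodes : List (String × Int)) (moves : List (Int × String × String))
    (n m : Nat) (st : PvSt) (hInv : pvInvO moves st.2.2.2.2)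
    (hn : moves.length ≤ n + st.2.2.2.2.length) (hm : moves.length ≤ m + st.2.2.2.2.length) :
    pvGA nodes moves n st = pvGA nodes moves m st := by
  induction n generalizing m st with
  | zero =>
      have hnil : pvSuccSt moves st = [] :=
        pvSucc_nil_of_full moves _ _ _ _ _ hInv (by omega)
      cases m with
      | zero => rfl
      | succ m' => simp [pvGA, hnil]
  | succ n ih =>
      cases m with
      | zero =>
          have hnil : pvSuccSt moves st = [] :=
            pvSucc_nil_of_full moves _ _ _ _ _ hInv (by omega)
          simp [pvGA, hnil]
      | succ m' =>
          simp only [pvGA]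
          have hmap : (pvSuccSt moves st).map (pvGA nodes moves n)
              = (pvSuccSt moves st).map (pvGA nodes moves m') := by
            apply List.map_congr_left
            intro t htm
            obtain ⟨hInvt, hlent⟩ := pvInvO_succ moves _ _ _ _ _ t hInv htm
            exact ih m' t hInvt (by omega) (by omega)
          rw [hmap]

-- ---- characterization of A's folds ----
theorem pvMoveFold (moves : List (Int × String × String)) (ct : Int) (n1 : String) (nt : Int)
    (n2 : String) (opened : List (String × Int)) (nq : PySem.Set PvSt) (b : Bool) :
    moves.foldl (pvMoveStepA ct n1 nt n2 opened (PySem.Dict.ofList opened)) (nq, b)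
      = (PySem.Set.update nq (pvSuccA moves ct n1 nt n2 opened),
         b || !(pvSuccA moves ct n1 nt n2 opened).isEmpty) := by
  induction moves generalizing nq b with
  | nil => simp [pvSuccA, PySem.Set.update]
  | cons m ms ih =>
      have hgiff : (m.2.1 ≠ n1 ∨ (PySem.Dict.ofList opened).contains m.2.2 = true ∨ 26 ≤ ct + m.1)
          ↔ (m.2.1 ≠ n1 ∨ m.2.2 ∈ opened.map Prod.fst ∨ 26 ≤ ct + m.1) := by
        rw [pvContains_ofList]
      by_cases hg : (m.2.1 ≠ n1 ∨ m.2.2 ∈ opened.map Prod.fst ∨ 26 ≤ ct + m.1)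
      · rw [List.foldl_cons]
        rw [show pvMoveStepA ct n1 nt n2 opened (PySem.Dict.ofList opened) (nq, b) m = (nq, b) from
          by rw [pvMoveStepA, if_pos (hgiff.2 hg)]]
        rw [ih]
        rw [show pvSuccA (m :: ms) ct n1 nt n2 opened = pvSuccA ms ct n1 nt n2 opened from by
          rw [pvSuccA, List.filterMap_cons, if_pos hg]; rfl]
      · rw [List.foldl_cons]
        have hstep : pvMoveStepA ct n1 nt n2 opened (PySem.Dict.ofList opened) (nq, b) m
            = (nq.add (if nt < ct + m.1 then (nt, n2, ct + m.1, m.2.2,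
                  PySem.List.sorted2 (opened ++ [(m.2.2, 26 - ct - m.1)]) Prod.fst Prod.snd)
                else (ct + m.1, m.2.2, nt, n2,
                  PySem.List.sorted2 (opened ++ [(m.2.2, 26 - ct - m.1)]) Prod.fst Prod.snd)), true) := by
          rw [pvMoveStepA, if_neg (fun hc => hg (hgiff.1 hc))]
        have hsucc : pvSuccA (m :: ms) ct n1 nt n2 opened
            = (if nt < ct + m.1 then (nt, n2, ct + m.1, m.2.2,
                  PySem.List.sorted2 (opened ++ [(m.2.2, 26 - ct - m.1)]) Prod.fst Prod.snd)
                else (ct + m.1, m.2.2, nt, n2,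
                  PySem.List.sorted2 (opened ++ [(m.2.2, 26 - ct - m.1)]) Prod.fst Prod.snd))
              :: pvSuccA ms ct n1 nt n2 opened := by
          rw [pvSuccA, List.filterMap_cons, if_neg hg]; rfl
        rw [hstep, ih, hsucc]
        simp [PySem.Set.update]

theorem pvStateFold (moves : List (Int × String × String)) (q : List PvSt)
    (q0 : PySem.Set PvSt) (f0 : PySem.Set (List (String × Int))) :
    q.foldl (pvStateStepA moves) (q0, f0)
      = (PySem.Set.update q0 (q.flatMap (pvSuccSt moves)),
         PySem.Set.update f0 (pvStuckList moves q)) := by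
  induction q generalizing q0 f0 with
  | nil => simp [pvStuckList, PySem.Set.update]
  | cons st q ih =>
      obtain ⟨ct, n1, nt, n2, op⟩ := st
      have hstep : pvStateStepA moves (q0, f0) (ct, n1, nt, n2, op)
          = (PySem.Set.update q0 (pvSuccA moves ct n1 nt n2 op),
             if (pvSuccA moves ct n1 nt n2 op).isEmpty then f0.add op else f0) := by
        show (if (moves.foldl (pvMoveStepA ct n1 nt n2 op (PySem.Dict.ofList op)) (q0, false)).2
              then ((moves.foldl (pvMoveStepA ct n1 nt n2 op (PySem.Dict.ofList op)) (q0, false)).1, f0)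
              else ((moves.foldl (pvMoveStepA ct n1 nt n2 op (PySem.Dict.ofList op)) (q0, false)).1, f0.add op)) = _
        rw [show moves.foldl (pvMoveStepA ct n1 nt n2 op (PySem.Dict.ofList op)) (q0, false)
            = (PySem.Set.update q0 (pvSuccA moves ct n1 nt n2 op),
               false || !(pvSuccA moves ct n1 nt n2 op).isEmpty) from
          pvMoveFold moves ct n1 nt n2 op q0 false]
        cases h : (pvSuccA moves ct n1 nt n2 op).isEmpty <;> simp
      rw [List.foldl_cons, hstep]
      cases h : (pvSuccA moves ct n1 nt n2 op).isEmpty with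
      | true =>
          have hnil : pvSuccA moves ct n1 nt n2 op = [] := List.isEmpty_iff.1 h
          rw [if_pos rfl, ih]
          have h1 : pvStuckList moves ((ct, n1, nt, n2, op) :: q)
              = op :: pvStuckList moves q := by
            simp [pvStuckList, pvSuccSt, h]
          have h2 : ((ct, n1, nt, n2, op) :: q).flatMap (pvSuccSt moves)
              = q.flatMap (pvSuccSt moves) := by
            simp [List.flatMap_cons, pvSuccSt, hnil]
          rw [h1, h2, hnil]
          have h3 : PySem.Set.update q0 ([] : List PvSt) = q0 := rfl
          have h4 : PySem.Set.update f0 (op :: pvStuckList moves q)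
              = PySem.Set.update (f0.add op) (pvStuckList moves q) := rfl
          rw [h3, h4]
      | false =>
          rw [if_neg (by simp), ih]
          have h1 : pvStuckList moves ((ct, n1, nt, n2, op) :: q) = pvStuckList moves q := by
            simp [pvStuckList, pvSuccSt, h]
          have h2 : ((ct, n1, nt, n2, op) :: q).flatMap (pvSuccSt moves)
              = pvSuccA moves ct n1 nt n2 op ++ q.flatMap (pvSuccSt moves) := by
            simp [List.flatMap_cons, pvSuccSt]
          rw [h1, h2]
          have h3 : PySem.Set.update q0
                (pvSuccA moves ct n1 nt n2 op ++ q.flatMap (pvSuccSt moves))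
              = PySem.Set.update (PySem.Set.update q0 (pvSuccA moves ct n1 nt n2 op))
                  (q.flatMap (pvSuccSt moves)) := by
            simp [PySem.Set.update, List.foldl_append]
          rw [h3]

-- ---- splitting the value of a frontier into stuck scores and expanded successors ----
theorem pvMQ_split (nodes : List (String × Int)) (moves : List (Int × String × String))
    (q : List PvSt) (hq : ∀ st ∈ q, pvInvO moves st.2.2.2.2) :
    pvMaxO (q.map (pvGA nodes moves (moves.length + 1)))
      = pvOmax (pvMaxO ((pvStuckList moves q).map (pvScore nodes)))
               (pvMaxO ((q.flatMap (pvSuccSt moves)).map (pvGA nodes moves (moves.length + 1)))) := by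
  induction q with
  | nil => rfl
  | cons st q ih =>
      have hInv : pvInvO moves st.2.2.2.2 := hq st (by simp)
      have hq' : ∀ s ∈ q, pvInvO moves s.2.2.2.2 := fun s hs => hq s (List.mem_cons_of_mem _ hs)
      have hmapG : (pvSuccSt moves st).map (pvGA nodes moves moves.length)
          = (pvSuccSt moves st).map (pvGA nodes moves (moves.length + 1)) := by
        apply List.map_congr_left
        intro t htm
        obtain ⟨hInvt, _⟩ := pvInvO_succ moves _ _ _ _ _ t hInv htm
        exact pvGA_fuel nodes moves moves.length (moves.length + 1) t hInvt (by omega) (by omega)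
      rw [List.map_cons, pvMaxO_cons_omax, ih hq']
      cases hs : pvMaxO ((pvSuccSt moves st).map (pvGA nodes moves (moves.length + 1))) with
      | none =>
          have hnil : pvSuccSt moves st = [] :=
            List.map_eq_nil_iff.1 ((pvMaxO_none_iff _).1 hs)
          have hG : pvGA nodes moves (moves.length + 1) st = pvScore nodes st.2.2.2.2 := by
            show (match ((pvSuccSt moves st).map (pvGA nodes moves moves.length)).foldl pvOmax2 none with
                  | some r => r | none => pvScore nodes st.2.2.2.2) = _
            rw [show ((pvSuccSt moves st).map (pvGA nodes moves moves.length)).foldl pvOmax2 none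
                = (none : Option Int) from by rw [hmapG]; exact hs]
          have h1 : pvStuckList moves (st :: q) = st.2.2.2.2 :: pvStuckList moves q := by
            simp [pvStuckList, hnil]
          have h2 : (st :: q).flatMap (pvSuccSt moves) = q.flatMap (pvSuccSt moves) := by
            simp [hnil]
          rw [h1, h2, hG, List.map_cons, pvMaxO_cons_omax, pvOmax_assoc]
      | some r =>
          have hne : pvSuccSt moves st ≠ [] := by
            intro hc
            rw [hc] at hs
            simp [pvMaxO] at hs
          have hemp : (pvSuccSt moves st).isEmpty = false := by
            cases hemp2 : (pvSuccSt moves st).isEmpty with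
            | false => rfl
            | true => exact absurd (List.isEmpty_iff.1 hemp2) hne
          have hG : pvGA nodes moves (moves.length + 1) st = r := by
            show (match ((pvSuccSt moves st).map (pvGA nodes moves moves.length)).foldl pvOmax2 none with
                  | some r => r | none => pvScore nodes st.2.2.2.2) = _
            rw [show ((pvSuccSt moves st).map (pvGA nodes moves moves.length)).foldl pvOmax2 none
                = some r from by rw [hmapG]; exact hs]
          have h1 : pvStuckList moves (st :: q) = pvStuckList moves q := by
            simp [pvStuckList, hemp]
          have h2 : (st :: q).flatMap (pvSuccSt moves)
              = pvSuccSt moves st ++ q.flatMap (pvSuccSt moves) := by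
            simp
          rw [h1, h2, hG, List.map_append, pvMaxO_append, hs, pvOmax_left_comm]

theorem pvLoopA_max (nodes : List (String × Int)) (moves : List (Int × String × String))
    (fuel : Nat) (q : PySem.Set PvSt) (f : PySem.Set (List (String × Int)))
    (hq : ∀ st ∈ q, pvInvO moves st.2.2.2.2 ∧ moves.length + 1 ≤ fuel + st.2.2.2.2.length) :
    pvMaxO ((pvLoopA moves fuel q f).map (pvScore nodes))
      = pvOmax (pvMaxO (f.map (pvScore nodes)))
               (pvMaxO (q.map (pvGA nodes moves (moves.length + 1)))) := by
  induction fuel generalizing q f with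
  | zero =>
      have hq0 : q = [] := by
        cases q with
        | nil => rfl
        | cons st t =>
            obtain ⟨hInv, hb⟩ := hq st (by simp)
            have := pvLen_le moves st.2.2.2.2 hInv
            omega
      subst hq0
      show pvMaxO (f.map (pvScore nodes)) = _
      rw [show pvMaxO (List.map (pvGA nodes moves (moves.length + 1)) ([] : List PvSt))
          = none from rfl, pvOmax_none_right]
  | succ fuel ih =>
      by_cases hq0 : q = []
      · subst hq0
        show pvMaxO (f.map (pvScore nodes)) = _
        rw [show pvMaxO (List.map (pvGA nodes moves (moves.length + 1)) ([] : List PvSt))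
            = none from rfl, pvOmax_none_right]
      · have hunf : pvLoopA moves (fuel + 1) q f = pvLoopA moves fuel
            (PySem.Set.update PySem.Set.empty (q.flatMap (pvSuccSt moves)))
            (PySem.Set.update f (pvStuckList moves q)) := by
          show (if q = [] then f else
                let r := q.foldl (pvStateStepA moves) (PySem.Set.empty, f);
                pvLoopA moves fuel r.1 r.2) = _
          rw [if_neg hq0, pvStateFold]
        have hq' : ∀ s ∈ PySem.Set.update PySem.Set.empty (q.flatMap (pvSuccSt moves)),
            pvInvO moves s.2.2.2.2 ∧ moves.length + 1 ≤ fuel + s.2.2.2.2.length := by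
          intro s hs
          have hs' : s ∈ q.flatMap (pvSuccSt moves) := by
            rcases (PySem.Set.mem_update PySem.Set.empty _ s).1 hs with hmem | hmem
            · exact absurd hmem (List.not_mem_nil)
            · exact hmem
          obtain ⟨st, hst, hsm⟩ := List.mem_flatMap.1 hs'
          obtain ⟨hInv, hb⟩ := hq st hst
          obtain ⟨hInvs, hlen⟩ := pvInvO_succ moves _ _ _ _ _ s hInv hsm
          exact ⟨hInvs, by omega⟩
        rw [hunf, ih _ _ hq']
        have hf : pvMaxO ((PySem.Set.update f (pvStuckList moves q)).map (pvScore nodes))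
            = pvOmax (pvMaxO (f.map (pvScore nodes)))
                     (pvMaxO ((pvStuckList moves q).map (pvScore nodes))) := by
          rw [pvMaxO_congr ((PySem.Set.update f (pvStuckList moves q)).map (pvScore nodes))
              ((f ++ pvStuckList moves q).map (pvScore nodes))
              (by
                intro x
                simp only [List.mem_map, PySem.Set.mem_update, List.mem_append])]
          rw [List.map_append, pvMaxO_append]
        have hqm : pvMaxO ((PySem.Set.update PySem.Set.empty (q.flatMap (pvSuccSt moves))).map
                (pvGA nodes moves (moves.length + 1)))
            = pvMaxO ((q.flatMap (pvSuccSt moves)).map (pvGA nodes moves (moves.length + 1))) := by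
          apply pvMaxO_congr
          intro x
          simp only [List.mem_map, PySem.Set.mem_update]
          constructor
          · rintro ⟨a, ha | ha, rfl⟩
            · exact absurd ha (List.not_mem_nil)
            · exact ⟨a, ha, rfl⟩
          · rintro ⟨a, ha, rfl⟩
            exact ⟨a, Or.inr ha, rfl⟩
        rw [hf, hqm, pvMQ_split nodes moves q (fun s hs => (hq s hs).1), pvOmax_assoc]

-- ---- B equals the same state value ----
theorem pvBestB_eq_GA (nodes : List (String × Int)) (moves : List (Int × String × String))
    (fuel : Nat) (ct : Int) (n1 : String) (nt : Int) (n2 : String)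
    (oa ob : List (String × Int)) (h : oa.Perm ob) :
    pvGA nodes moves fuel (ct, n1, nt, n2, oa) = pvBestB nodes moves fuel ct n1 nt n2 ob := by
  induction fuel generalizing ct n1 nt n2 oa ob with
  | zero => exact pvScore_perm nodes oa ob h
  | succ fuel ih =>
      have hfold : ∀ (ms : List (Int × String × String)), ∀ (a : Option Int),
          ms.foldl (fun (result : Option Int) m =>
            if m.2.1 ≠ n1 ∨ PySem.Set.contains (PySem.Set.ofList (ob.map Prod.fst)) m.2.2 = true ∨ 26 ≤ ct + m.1 then result
            else
              let sub := if nt < ct + m.1 then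
                  pvBestB nodes moves fuel nt n2 (ct + m.1) m.2.2 (ob ++ [(m.2.2, 26 - ct - m.1)])
                else
                  pvBestB nodes moves fuel (ct + m.1) m.2.2 nt n2 (ob ++ [(m.2.2, 26 - ct - m.1)])
              match result with
              | none => some sub
              | some r => some (if sub > r then sub else r)) a
          = ((pvSuccA ms ct n1 nt n2 oa).map (pvGA nodes moves fuel)).foldl pvOmax2 a := by
        intro ms
        induction ms with
        | nil => intro a; rfl
        | cons m ms ihm =>
            intro a
            have hgiff : (m.2.1 ≠ n1 ∨ PySem.Set.contains (PySem.Set.ofList (ob.map Prod.fst)) m.2.2 = true ∨ 26 ≤ ct + m.1)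
                ↔ (m.2.1 ≠ n1 ∨ m.2.2 ∈ oa.map Prod.fst ∨ 26 ≤ ct + m.1) := by
              rw [pvSetContains_ofList, List.Perm.mem_iff (List.Perm.map Prod.fst h)]
            by_cases hg : (m.2.1 ≠ n1 ∨ m.2.2 ∈ oa.map Prod.fst ∨ 26 ≤ ct + m.1)
            · have hskip : (if m.2.1 ≠ n1 ∨ PySem.Set.contains (PySem.Set.ofList (ob.map Prod.fst)) m.2.2 = true ∨ 26 ≤ ct + m.1 then a
              else
                let sub := if nt < ct + m.1 then
                  pvBestB nodes moves fuel nt n2 (ct + m.1) m.2.2 (ob ++ [(m.2.2, 26 - ct - m.1)])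
                else
                  pvBestB nodes moves fuel (ct + m.1) m.2.2 nt n2 (ob ++ [(m.2.2, 26 - ct - m.1)])
                match a with
                | none => some sub
                | some r => some (if sub > r then sub else r)) = a := by
                rw [if_pos (hgiff.2 hg)]
              rw [List.foldl_cons, hskip,
                show pvSuccA (m :: ms) ct n1 nt n2 oa = pvSuccA ms ct n1 nt n2 oa from by
                  rw [pvSuccA, List.filterMap_cons, if_pos hg]; rfl]
              exact ihm a
            · have hperm : (PySem.List.sorted2 (oa ++ [(m.2.2, 26 - ct - m.1)]) Prod.fst Prod.snd).Perm
                  (ob ++ [(m.2.2, 26 - ct - m.1)]) :=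
                (PySem.List.sorted2_perm _ _ _ _).trans (h.append_right _)
              have hsub : pvGA nodes moves fuel
                    (if nt < ct + m.1 then (nt, n2, ct + m.1, m.2.2,
                        PySem.List.sorted2 (oa ++ [(m.2.2, 26 - ct - m.1)]) Prod.fst Prod.snd)
                      else (ct + m.1, m.2.2, nt, n2,
                        PySem.List.sorted2 (oa ++ [(m.2.2, 26 - ct - m.1)]) Prod.fst Prod.snd))
                  = (if nt < ct + m.1 then
                  pvBestB nodes moves fuel nt n2 (ct + m.1) m.2.2 (ob ++ [(m.2.2, 26 - ct - m.1)])
                else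
                  pvBestB nodes moves fuel (ct + m.1) m.2.2 nt n2 (ob ++ [(m.2.2, 26 - ct - m.1)])) := by
                by_cases hb : nt < ct + m.1
                · rw [if_pos hb, if_pos hb]
                  exact ih nt n2 (ct + m.1) m.2.2 _ _ hperm
                · rw [if_neg hb, if_neg hb]
                  exact ih (ct + m.1) m.2.2 nt n2 _ _ hperm
              have hacc : (if m.2.1 ≠ n1 ∨ PySem.Set.contains (PySem.Set.ofList (ob.map Prod.fst)) m.2.2 = true ∨ 26 ≤ ct + m.1 then a
              else
                let sub := if nt < ct + m.1 then
                  pvBestB nodes moves fuel nt n2 (ct + m.1) m.2.2 (ob ++ [(m.2.2, 26 - ct - m.1)])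
                else
                  pvBestB nodes moves fuel (ct + m.1) m.2.2 nt n2 (ob ++ [(m.2.2, 26 - ct - m.1)])
                match a with
                | none => some sub
                | some r => some (if sub > r then sub else r))
                  = pvOmax2 a (pvGA nodes moves fuel
                      (if nt < ct + m.1 then (nt, n2, ct + m.1, m.2.2,
                          PySem.List.sorted2 (oa ++ [(m.2.2, 26 - ct - m.1)]) Prod.fst Prod.snd)
                        else (ct + m.1, m.2.2, nt, n2,
                          PySem.List.sorted2 (oa ++ [(m.2.2, 26 - ct - m.1)]) Prod.fst Prod.snd))) := by
                rw [if_neg (fun hc => hg (hgiff.1 hc)), hsub]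
                rfl
              rw [List.foldl_cons, hacc,
                show pvSuccA (m :: ms) ct n1 nt n2 oa
                  = (if nt < ct + m.1 then (nt, n2, ct + m.1, m.2.2,
                        PySem.List.sorted2 (oa ++ [(m.2.2, 26 - ct - m.1)]) Prod.fst Prod.snd)
                      else (ct + m.1, m.2.2, nt, n2,
                        PySem.List.sorted2 (oa ++ [(m.2.2, 26 - ct - m.1)]) Prod.fst Prod.snd))
                    :: pvSuccA ms ct n1 nt n2 oa from by
                  rw [pvSuccA, List.filterMap_cons, if_neg hg]; rfl,
                List.map_cons, List.foldl_cons]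
              exact ihm _
      have hmain := hfold moves none
      show (match ((pvSuccA moves ct n1 nt n2 oa).map (pvGA nodes moves fuel)).foldl pvOmax2 none with
            | some r => r | none => pvScore nodes oa)
          = (match moves.foldl (fun (result : Option Int) m =>
            if m.2.1 ≠ n1 ∨ PySem.Set.contains (PySem.Set.ofList (ob.map Prod.fst)) m.2.2 = true ∨ 26 ≤ ct + m.1 then result
            else
              let sub := if nt < ct + m.1 then
                  pvBestB nodes moves fuel nt n2 (ct + m.1) m.2.2 (ob ++ [(m.2.2, 26 - ct - m.1)])
                else
                  pvBestB nodes moves fuel (ct + m.1) m.2.2 nt n2 (ob ++ [(m.2.2, 26 - ct - m.1)])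
              match result with
              | none => some sub
              | some r => some (if sub > r then sub else r)) none with
            | some r => r | none => pvScore nodes ob)
      rw [hmain]
      cases ((pvSuccA moves ct n1 nt n2 oa).map (pvGA nodes moves fuel)).foldl pvOmax2 none with
      | some r => rfl
      | none => exact pvScore_perm nodes oa ob h

-- ===== VERDICT (by name: the statement is the Claim_ definition above) =====
theorem part2_spec : Claim_equal_part2 := by
  intro nodes moves _ _
  unfold Spec_part2 part2 part2_alt
  have hinit : ∀ st ∈ (PySem.Set.ofList
        [((0 : Int), "AA", (0 : Int), "AA", ([] : List (String × Int)))] : PySem.Set PvSt),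
      pvInvO moves st.2.2.2.2 ∧ moves.length + 1 ≤ (moves.length + 1) + st.2.2.2.2.length := by
    intro st hst
    have hst' : st = ((0 : Int), "AA", (0 : Int), "AA", ([] : List (String × Int))) := by
      simpa [PySem.Set.ofList, PySem.Set.add, PySem.Set.empty, PySem.Set.contains] using hst
    subst hst'
    exact ⟨⟨List.nodup_nil, by simp⟩, by omega⟩
  have hloop := pvLoopA_max nodes moves (moves.length + 1)
      (PySem.Set.ofList [((0 : Int), "AA", (0 : Int), "AA", ([] : List (String × Int)))])
      PySem.Set.empty hinit
  have hmax : pvMaxO ((pvLoopA moves (moves.length + 1)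
        (PySem.Set.ofList [((0 : Int), "AA", (0 : Int), "AA", ([] : List (String × Int)))])
        PySem.Set.empty).map (pvScore nodes))
      = some (pvGA nodes moves (moves.length + 1)
          ((0 : Int), "AA", (0 : Int), "AA", ([] : List (String × Int)))) := by
    rw [hloop]
    rfl
  show (match PySem.List.max? ((pvLoopA moves (moves.length + 1)
        (PySem.Set.ofList [((0 : Int), "AA", (0 : Int), "AA", ([] : List (String × Int)))])
        PySem.Set.empty).map (pvScore nodes)) (fun x => x) with
      | some m => m
      | none => 0)
      = pvBestB nodes moves (moves.length + 1) 0 "AA" 0 "AA" []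
  rw [pvMax?_eq_pvMaxO, hmax]
  exact pvBestB_eq_GA nodes moves (moves.length + 1) 0 "AA" 0 "AA" [] [] (List.Perm.refl _)
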